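-- pv_equiv track=rewrite | github.com/AlunStokes/collatz | src/self_ref.py | backward_collatz
-- ===== SOURCE A (Python) =====
-- def backward_collatz(w, depth, height):
--     L = [[w]]
--     i = 0
--     while i < depth:
--         l = []
--         for p in L[-1]:
--             j = 1
--             pref = p
--             while j <= height:
--                 p = 2**j * pref - 1
--                 if p % 3 != 0:
--                     j += 1
--                     continue
--                 p //= 3
--                 l.append(p)
--                 j += 1
--         L.append(l)
--         i += 1
--     return L
-- ===== SOURCE B (Python) =====
-- def backward_collatz(w, depth, height):
--     # Per node, iterate only the exponents j whose parity actually yields a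
--     # predecessor (even j when pref%3==1, odd j when pref%3==2), maintaining
--     # the power of two incrementally; levels are built front-to-back.
--     def preds(pref):
--         r = pref % 3
--         if r == 0:
--             return []
--         j = 2 if r == 1 else 1
--         power = 1 << j
--         out = []
--         while j <= height:
--             out.append((power * pref - 1) // 3)
--             j += 2
--             power <<= 2
--         return out
--     levels = [[w]]
--     cur = [w]
--     for _ in range(max(depth, 0)):
--         cur = [q for p in cur for q in preds(p)]
--         levels.append(cur)
--     return levels
-- ===== Notes on version B (the rewrite author's own statement) =====
-- stated objective: alternative
-- what changed: Per node B computes pref%3 once and iterates only the exponents j of the productive parity (even j for pref%3==1, odd for pref%3==2, none for 0), maintaining 2**j incrementally instead of recomputing 2**j and testing divisibility at every j; levels are built front-to-back instead of appended to a growing list indexed with [-1].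
import Mathlib
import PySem

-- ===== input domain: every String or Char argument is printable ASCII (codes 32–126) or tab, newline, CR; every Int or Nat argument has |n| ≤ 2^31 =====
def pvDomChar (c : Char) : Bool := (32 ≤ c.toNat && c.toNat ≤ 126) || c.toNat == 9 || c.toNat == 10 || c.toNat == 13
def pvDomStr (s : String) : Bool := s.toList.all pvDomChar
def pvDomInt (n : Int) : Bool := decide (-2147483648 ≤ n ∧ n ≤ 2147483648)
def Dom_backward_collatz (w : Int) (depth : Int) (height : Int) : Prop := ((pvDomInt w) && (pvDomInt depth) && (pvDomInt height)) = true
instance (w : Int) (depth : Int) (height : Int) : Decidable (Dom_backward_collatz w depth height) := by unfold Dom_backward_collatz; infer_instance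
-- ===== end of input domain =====

-- B iterates only the exponents j of the productive parity per node (computed from pref % 3),
-- maintaining the power of two incrementally, and builds levels front-to-back (objective: alternative algorithm; halves the inner iterations).

-- ===== PORT A =====
-- inner 'while j <= height' loop of A; j starts at 1, so 2**j = 2 ^ j.toNat exactly
def innerA (pref height : Int) (j : Int) (l : List Int) : List Int :=
  if _h : j ≤ height then
    let p := 2 ^ j.toNat * pref - 1
    if PySem.Int.mod p 3 ≠ 0 then innerA pref height (j + 1) l
    else innerA pref height (j + 1) (l ++ [PySem.Int.floordiv p 3])
  else l
termination_by (height + 1 - j).toNat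
decreasing_by all_goals omega

-- 'for p in L[-1]' body accumulating into l
def levelA (nodes : List Int) (height : Int) : List Int :=
  nodes.foldl (fun l p => innerA p height 1 l) []

-- outer 'while i < depth' loop; L[-1] is never missing since L starts nonempty
def loopA (depth height : Int) (L : List (List Int)) (i : Int) : List (List Int) :=
  if _h : i < depth then
    loopA depth height (L ++ [levelA ((PySem.List.pyGet? L (-1)).getD []) height]) (i + 1)
  else L
termination_by (depth - i).toNat
decreasing_by all_goals omega

def backward_collatz (w : Int) (depth : Int) (height : Int) : List (List Int) :=
  loopA depth height [[w]] 0

-- ===== PORT B =====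
-- the 'while j <= height' loop of B's preds: emits a predecessor at every step, power *= 4
def chainB (pref height : Int) (j power : Int) : List Int :=
  if _h : j ≤ height then
    PySem.Int.floordiv (power * pref - 1) 3 :: chainB pref height (j + 2) (power * 4)
  else []
termination_by (height + 2 - j).toNat
decreasing_by all_goals omega

def predsB (pref height : Int) : List Int :=
  let r := PySem.Int.mod pref 3
  if r = 0 then []
  else if r = 1 then chainB pref height 2 4
  else chainB pref height 1 2

-- 'for _ in range(max(depth,0))' building levels front-to-back
def levelsB (cur : List Int) (height : Int) : Nat → List (List Int)
  | 0 => [cur]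
  | Nat.succ m => cur :: levelsB (cur.flatMap (fun p => predsB p height)) height m

def backward_collatz_alt (w : Int) (depth : Int) (height : Int) : List (List Int) :=
  levelsB [w] height depth.toNat

-- ===== PRECONDITION & SPEC =====
def Spec_backward_collatz (w : Int) (depth : Int) (height : Int) (out : List (List Int)) : Prop := out = backward_collatz_alt w depth height
instance (w : Int) (depth : Int) (height : Int) (out : List (List Int)) : Decidable (Spec_backward_collatz w depth height out) := by unfold Spec_backward_collatz; infer_instance

-- ===== CLAIM (what is proved, stated in full; the proofs are below) =====
def Claim_equal_backward_collatz : Prop := ∀ (w : Int) (depth : Int) (height : Int), Dom_backward_collatz w depth height → Spec_backward_collatz w depth height (backward_collatz w depth height)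

-- ===== LEMMAS AND PROOFS =====

theorem pow2_mod3 (n : Nat) : (2 : Int) ^ n % 3 = if n % 2 = 0 then 1 else 2 := by
  induction n with
  | zero => simp
  | succ n ih =>
    rw [pow_succ, Int.mul_emod, ih]
    by_cases h : n % 2 = 0 <;> simp [h, Nat.succ_mod_two_eq_zero_iff]

-- the divisibility test of A, characterised by the parity of j
theorem cond_iff (pref j : Int) (hj : 1 ≤ j) :
    ((2 : Int) ^ j.toNat * pref - 1) % 3 = 0 ↔
      (pref % 3 = 1 ∧ j % 2 = 0) ∨ (pref % 3 = 2 ∧ j % 2 = 1) := by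
  have hpar : (j.toNat % 2 = 0) ↔ (j % 2 = 0) := by omega
  have h1 : ((2 : Int) ^ j.toNat * pref - 1) % 3 = ((2 : Int) ^ j.toNat % 3 * (pref % 3) % 3 - 1 % 3) % 3 := by
    conv_lhs => rw [Int.sub_emod, Int.mul_emod]
  rw [h1, pow2_mod3]
  have h2 : 0 ≤ pref % 3 := Int.emod_nonneg _ (by norm_num)
  have h3 : pref % 3 < 3 := Int.emod_lt_of_pos _ (by norm_num)
  by_cases h : j.toNat % 2 = 0
  · rw [if_pos h]; omega
  · rw [if_neg h]; omega

theorem innerA_stop (pref height j : Int) (l : List Int) (hj : ¬ j ≤ height) :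
    innerA pref height j l = l := by
  rw [innerA]; simp [hj]

theorem chainB_stop (pref height j power : Int) (hj : ¬ j ≤ height) :
    chainB pref height j power = [] := by
  rw [chainB]; simp [hj]

theorem innerA_acc (pref height : Int) :
    ∀ n j l, (height + 1 - j).toNat ≤ n →
      innerA pref height j l = l ++ innerA pref height j [] := by
  intro n
  induction n with
  | zero =>
    intro j l h
    have hj : ¬ j ≤ height := by omega
    rw [innerA_stop _ _ _ _ hj, innerA_stop _ _ _ _ hj]
    simp
  | succ n ih =>
    intro j l h
    by_cases hj : j ≤ height
    · rw [innerA]; conv_rhs => rw [innerA]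
      simp only [dif_pos hj, List.nil_append]
      split_ifs with hm
      · exact ih (j + 1) l (by omega)
      · rw [ih (j + 1) (l ++ _) (by omega), ih (j + 1) ([_]) (by omega), List.append_assoc]
    · rw [innerA_stop _ _ _ _ hj, innerA_stop _ _ _ _ hj]; simp

theorem innerA_nil (pref height : Int) (h0 : pref % 3 = 0) :
    ∀ n j, 1 ≤ j → (height + 1 - j).toNat ≤ n → innerA pref height j [] = [] := by
  intro n
  induction n with
  | zero =>
    intro j _ h
    exact innerA_stop _ _ _ _ (by omega)
  | succ n ih =>
    intro j hj1 h
    by_cases hj : j ≤ height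
    · rw [innerA]
      have hc : ¬ ((2 : Int) ^ j.toNat * pref - 1) % 3 = 0 := by
        rw [cond_iff pref j hj1]; omega
      have hm : PySem.Int.mod ((2 : Int) ^ j.toNat * pref - 1) 3 ≠ 0 := by
        rw [PySem.Int.mod_eq_emod_of_pos (by norm_num)]; exact hc
      simp only [dif_pos hj, if_pos hm]
      exact ih (j + 1) (by omega) (by omega)
    · rw [innerA]; simp [hj]

theorem chainB_step (pref height j power : Int) (hj : j ≤ height) :
    chainB pref height j power
      = PySem.Int.floordiv (power * pref - 1) 3 :: chainB pref height (j + 2) (power * 4) := by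
  rw [chainB]; simp [hj]

theorem pow_toNat_add_two (j : Int) (hj : 1 ≤ j) :
    (2 : Int) ^ j.toNat * 4 = 2 ^ (j + 2).toNat := by
  have h : (j + 2).toNat = j.toNat + 2 := by omega
  rw [h, pow_add]; norm_num

-- the core: A's parity-filtered scan equals B's stride-2 chain
theorem innerA_chain (pref height t : Int) (ht : t = 0 ∨ t = 1)
    (hc : ∀ j : Int, 1 ≤ j → (((2 : Int) ^ j.toNat * pref - 1) % 3 = 0 ↔ j % 2 = t)) :
    ∀ n j, 1 ≤ j → (height + 1 - j).toNat ≤ n →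
      innerA pref height j []
        = if j % 2 = t then chainB pref height j ((2 : Int) ^ j.toNat)
          else chainB pref height (j + 1) ((2 : Int) ^ (j + 1).toNat) := by
  intro n
  induction n with
  | zero =>
    intro j hj1 h
    have hj : ¬ j ≤ height := by omega
    rw [innerA_stop _ _ _ _ hj, chainB_stop _ _ _ _ hj, chainB_stop _ _ _ _ (by omega)]
    simp
  | succ n ih =>
    intro j hj1 h
    by_cases hj : j ≤ height
    · rw [innerA]
      simp only [dif_pos hj]
      by_cases hp : j % 2 = t
      · -- the test succeeds at j
        have hcj : ((2 : Int) ^ j.toNat * pref - 1) % 3 = 0 := (hc j hj1).mpr hp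
        have hm : ¬ PySem.Int.mod ((2 : Int) ^ j.toNat * pref - 1) 3 ≠ 0 := by
          rw [PySem.Int.mod_eq_emod_of_pos (by norm_num)]; simp [hcj]
        simp only [if_neg hm]
        rw [innerA_acc pref height n (j + 1) _ (by omega)]
        rw [ih (j + 1) (by omega) (by omega)]
        have hp1 : ¬ (j + 1) % 2 = t := by omega
        simp only [if_neg hp1, if_pos hp]
        rw [chainB_step pref height j _ hj, pow_toNat_add_two j hj1,
          show j + 1 + 1 = j + 2 by ring]
        simp
      · -- the test fails at j
        have hcj : ¬ ((2 : Int) ^ j.toNat * pref - 1) % 3 = 0 := by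
          rw [hc j hj1]; exact hp
        have hm : PySem.Int.mod ((2 : Int) ^ j.toNat * pref - 1) 3 ≠ 0 := by
          rw [PySem.Int.mod_eq_emod_of_pos (by norm_num)]; exact hcj
        simp only [if_pos hm]
        rw [ih (j + 1) (by omega) (by omega)]
        have hp1 : (j + 1) % 2 = t := by omega
        simp only [if_pos hp1, if_neg hp]
    · rw [innerA_stop _ _ _ _ hj, chainB_stop _ _ _ _ hj, chainB_stop _ _ _ _ (by omega)]
      simp

theorem innerA_eq_predsB (p height : Int) : innerA p height 1 [] = predsB p height := by
  have h23 : p % 3 = 0 ∨ p % 3 = 1 ∨ p % 3 = 2 := by omega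
  have hmod : PySem.Int.mod p 3 = p % 3 := PySem.Int.mod_eq_emod_of_pos (by norm_num)
  unfold predsB
  rw [hmod]
  rcases h23 with hr | hr | hr <;> rw [hr] <;> norm_num
  · exact innerA_nil p height hr ((height + 1 - 1).toNat) 1 le_rfl le_rfl
  · have := innerA_chain p height 0 (Or.inl rfl)
      (fun j hj => by rw [cond_iff p j hj, hr]; omega)
      ((height + 1 - 1).toNat) 1 le_rfl le_rfl
    simpa using this
  · have := innerA_chain p height 1 (Or.inr rfl)
      (fun j hj => by rw [cond_iff p j hj, hr]; omega)
      ((height + 1 - 1).toNat) 1 le_rfl le_rfl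
    simpa using this

theorem levelA_eq (height : Int) :
    ∀ (nodes : List Int) (acc : List Int),
      nodes.foldl (fun l p => innerA p height 1 l) acc
        = acc ++ nodes.flatMap (fun p => predsB p height) := by
  intro nodes
  induction nodes with
  | nil => intro acc; simp
  | cons p rest ih =>
    intro acc
    simp only [List.foldl_cons, List.flatMap_cons]
    rw [ih, innerA_acc p height ((height + 1 - 1).toNat) 1 acc le_rfl,
      innerA_eq_predsB, List.append_assoc]

theorem loopA_inv (depth height : Int) :
    ∀ n (i : Int) (P : List (List Int)) (cur : List Int), (depth - i).toNat ≤ n →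
      loopA depth height (P ++ [cur]) i = P ++ levelsB cur height (depth - i).toNat := by
  intro n
  induction n with
  | zero =>
    intro i P cur h
    have hi : ¬ i < depth := by omega
    have h0 : (depth - i).toNat = 0 := by omega
    rw [loopA, h0]
    simp [hi, levelsB]
  | succ n ih =>
    intro i P cur h
    by_cases hi : i < depth
    · rw [loopA]
      simp only [dif_pos hi]
      rw [PySem.List.pyGet?_neg_one_append_singleton]
      simp only [Option.getD_some]
      have hl : levelA cur height = cur.flatMap (fun p => predsB p height) := by
        unfold levelA; simpa using levelA_eq height cur []
      rw [ih (i + 1) (P ++ [cur]) (levelA cur height) (by omega)]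
      have hm : (depth - i).toNat = (depth - (i + 1)).toNat + 1 := by omega
      rw [hm, levelsB, hl, List.append_assoc]
      rfl
    · rw [loopA]
      have h0 : (depth - i).toNat = 0 := by omega
      rw [h0]
      simp [hi, levelsB]

-- ===== VERDICT (by name: the statement is the Claim_ definition above) =====
theorem backward_collatz_spec : Claim_equal_backward_collatz := by
  intro w depth height _
  unfold Spec_backward_collatz backward_collatz backward_collatz_alt
  have := loopA_inv depth height (depth - 0).toNat 0 [] [w] le_rfl
  simp only [List.nil_append] at this
  rw [this]
  congr 1
  omega
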